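-- pv_equiv track=rewrite | github.com/HansDanielsson/Python-Intro | Tentamen/251028/Task3c.py | deleteunequal2
-- ===== SOURCE A (Python) =====
-- def deleteunequal2(lst1, lst2):
--   newlst = lst2
--   i = 0
--   j = 0
--   while i < len(lst1):
--     if lst1[i] != lst2[j]:
--       lst2[j:j+1] = []
--     else:
--       j = j + 1
--     i = i + 1
--   return newlst
-- ===== SOURCE B (Python) =====
-- def deleteunequal2(lst1, lst2):
--   # Single pass: keep the aligned-equal prefix pairs, append lst2's tail beyond
--   # len(lst1); assign back into lst2 in place (same mutation A performs).
--   kept = [y for x, y in zip(lst1, lst2) if x == y]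
--   lst2[:] = kept + lst2[len(lst1):]
--   return lst2
-- ===== Notes on version B (the rewrite author's own statement) =====
-- stated objective: faster
-- what changed: Replaces the while loop that repeatedly deletes lst2[j:j+1] in place (each slice-deletion is O(n)) by one pass zipping lst1 with lst2, keeping the positionally equal elements and appending lst2's tail past len(lst1), assigned back with lst2[:]=.
import Mathlib
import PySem

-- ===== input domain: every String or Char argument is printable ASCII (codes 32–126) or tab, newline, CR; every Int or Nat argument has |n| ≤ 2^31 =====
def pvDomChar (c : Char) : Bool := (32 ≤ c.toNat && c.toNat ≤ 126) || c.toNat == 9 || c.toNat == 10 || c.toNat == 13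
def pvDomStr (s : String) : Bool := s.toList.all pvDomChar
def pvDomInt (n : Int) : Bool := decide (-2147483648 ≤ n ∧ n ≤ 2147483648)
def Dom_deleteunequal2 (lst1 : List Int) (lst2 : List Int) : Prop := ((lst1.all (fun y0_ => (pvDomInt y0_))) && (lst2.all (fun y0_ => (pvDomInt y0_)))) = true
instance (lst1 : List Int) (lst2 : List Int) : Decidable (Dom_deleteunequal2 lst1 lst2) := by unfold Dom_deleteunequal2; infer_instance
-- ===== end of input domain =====

-- B replaces A's while loop with O(n) slice-deletions by a single zip/filter pass
-- plus lst2's tail (objective: faster, asymptotic). Python A and B both mutate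
-- lst2 in place the same way; the equivalence proved here is about the return value.

-- ===== PORT A =====
-- while i < len(lst1): each iteration increments i, so the loop runs lst1.length
-- times; fuel counts the remaining iterations. State (lst2, i, j) as in A.
-- lst2[j:j+1] = [] is exactly lst2[:j] ++ lst2[j+1:] (Python slice assignment).
-- pyGet? = none is Python's IndexError (outside Pre_); we return lst2 there.
def pvALoop (lst1 : List Int) (fuel : Nat) (lst2 : List Int) (i j : Int) : List Int :=
  match fuel with
  | 0 => lst2
  | f + 1 =>
    match PySem.List.pyGet? lst1 i, PySem.List.pyGet? lst2 j with
    | some a, some b =>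
      if a ≠ b then
        pvALoop lst1 f (PySem.List.slice lst2 none (some j) ++ PySem.List.slice lst2 (some (j + 1)) none) (i + 1) j
      else
        pvALoop lst1 f lst2 (i + 1) (j + 1)
    | _, _ => lst2

def deleteunequal2 (lst1 : List Int) (lst2 : List Int) : List Int :=
  pvALoop lst1 lst1.length lst2 0 0

-- ===== PORT B =====
def deleteunequal2_alt (lst1 : List Int) (lst2 : List Int) : List Int :=
  (((lst1.zip lst2).filter (fun p => p.1 == p.2)).map Prod.snd) ++ lst2.drop lst1.length

-- ===== PRECONDITION & SPEC =====
-- A raises IndexError at lst2[j] exactly when lst1 is longer than lst2.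
def Pre_deleteunequal2 (lst1 : List Int) (lst2 : List Int) : Prop :=
  lst1.length ≤ lst2.length
instance (lst1 : List Int) (lst2 : List Int) : Decidable (Pre_deleteunequal2 lst1 lst2) := by unfold Pre_deleteunequal2; infer_instance

def pvWitness_deleteunequal2 : List Int × List Int := ([1, 2], [1, 3, 4])

def Spec_deleteunequal2 (lst1 : List Int) (lst2 : List Int) (out : List Int) : Prop := out = deleteunequal2_alt lst1 lst2
instance (lst1 : List Int) (lst2 : List Int) (out : List Int) : Decidable (Spec_deleteunequal2 lst1 lst2 out) := by unfold Spec_deleteunequal2; infer_instance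

-- ===== CLAIM (what is proved, stated in full; the proofs are below) =====
def Claim_equal_deleteunequal2 : Prop := ∀ (lst1 : List Int) (lst2 : List Int), Dom_deleteunequal2 lst1 lst2 → Pre_deleteunequal2 lst1 lst2 → Spec_deleteunequal2 lst1 lst2 (deleteunequal2 lst1 lst2)

-- ===== LEMMAS AND PROOFS =====

-- Loop invariant: after i iterations lst2 = kept ++ rest where kept holds the j
-- elements kept so far and rest is the original lst2 from index i on; t1 is what
-- remains of lst1 from index i.
lemma pvALoop_eq : ∀ (t1 : List Int), ∀ (kept rest l1 : List Int) (i : Nat),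
    l1.drop i = t1 → t1.length ≤ rest.length →
    pvALoop l1 t1.length (kept ++ rest) (i : Int) (kept.length : Int) =
      kept ++ (((t1.zip rest).filter (fun p => p.1 == p.2)).map Prod.snd) ++ rest.drop t1.length := by
  intro t1
  induction t1 with
  | nil => intro kept rest l1 i _ _; simp [pvALoop]
  | cons a t1' ih =>
    intro kept rest l1 i hdrop hlen
    obtain ⟨b, rest', rfl⟩ : ∃ b rest', rest = b :: rest' := by
      cases rest with
      | nil => simp at hlen
      | cons b r => exact ⟨b, r, rfl⟩
    have hget1 : PySem.List.pyGet? l1 (i : Int) = some a := by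
      have h0 : l1[i]? = some a := by
        have h := (List.getElem?_drop (xs := l1) (i := i) (j := 0)).symm
        rw [hdrop] at h
        simpa using h
      simp [h0]
    have hget2 : PySem.List.pyGet? (kept ++ b :: rest') ((kept.length : Nat) : Int) = some b :=
      PySem.List.pyGet?_append_length (pre := kept) (y := b) (ys := rest')
    have hdrop' : l1.drop (i + 1) = t1' := by
      have : l1.drop (i + 1) = (l1.drop i).drop 1 := by
        rw [List.drop_drop]
      rw [this, hdrop]; rfl
    have hlen' : t1'.length ≤ rest'.length := by simpa using hlen
    rw [List.length_cons, pvALoop]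
    rw [hget1, hget2]
    by_cases hab : a = b
    · -- equal: keep b, j advances
      simp only [hab, ne_eq, not_true_eq_false, if_false]
      have hcast : ((kept.length : Int) + 1) = (((kept ++ [b]).length : Nat) : Int) := by
        simp
      have hicast : ((i : Int) + 1) = (((i + 1 : Nat)) : Int) := by push_cast; ring
      have hl2 : kept ++ b :: rest' = (kept ++ [b]) ++ rest' := by simp
      rw [hicast, hcast, hl2, ih (kept ++ [b]) rest' l1 (i + 1) hdrop' hlen']
      simp [List.zip_cons_cons]
    · -- unequal: delete lst2[j]
      simp only [ne_eq, hab, not_false_eq_true, if_true]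
      have hslice1 : PySem.List.slice (kept ++ b :: rest') none (some ((kept.length : Nat) : Int)) = kept := by
        rw [PySem.List.slice_to_natCast]
        simp
      have hslice2 : PySem.List.slice (kept ++ b :: rest') (some (((kept.length : Nat) : Int) + 1)) none = rest' := by
        have : ((kept.length : Int) + 1) = (((kept.length + 1 : Nat)) : Int) := by push_cast; ring
        rw [this, PySem.List.slice_from_natCast]
        simp
      have hicast : ((i : Int) + 1) = (((i + 1 : Nat)) : Int) := by push_cast; ring
      rw [hslice1, hslice2, hicast,
        ih kept rest' l1 (i + 1) hdrop' hlen']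
      have hfilt : ((a, b) :: t1'.zip rest').filter (fun p => p.1 == p.2)
          = (t1'.zip rest').filter (fun p => p.1 == p.2) := by
        simp [hab]
      simp [List.zip_cons_cons, hfilt]

-- ===== VERDICT (by name: the statement is the Claim_ definition above) =====
theorem deleteunequal2_spec : Claim_equal_deleteunequal2 := by
  intro lst1 lst2 _ hpre
  unfold Spec_deleteunequal2 deleteunequal2 deleteunequal2_alt
  have := pvALoop_eq lst1 ([] : List Int) lst2 lst1 0 (by simp) hpre
  simpa using this
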